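-- pv_equiv track=rewrite | github.com/kubas1129/WDI | lab7.py | removePrimeNumber
-- ===== SOURCE A (Python) =====
-- def primeEratostenes(n):
--     if (n < 2): return -1
--     primes = [i+1 for i in range(n)]  #init tablicy liczb
--     primes.remove(1)  #usuwamy 1
--     j = 0  #counter while
--     while j < len(primes):
--         numberToCheck = primes[j]
--         multipleOfValue = 1
--         while True:
--             #Liczymy aktualną wielokrotność
--             multipleOfValue += 1
--             searchNum = multipleOfValue * numberToCheck
--             if searchNum <= n:
--                 if searchNum in primes:
--                     primes.remove(searchNum)
--             else:
--                 break
--         j += 1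
--     return primes
--
-- def removePrimeNumber(lista):
--     lista.sort()
--     checkingNumber=lista[0]
--     count=0
--     wynikowa = ""
--     primes = primeEratostenes(lista[len(lista)-1])
--     for i in range(len(lista)):
--         if(checkingNumber == lista[i]):
--             count += 1
--         else:
--             if(count % 2 != 0):
--                 if (not(checkingNumber in primes)):
--                     wynikowa += count * (str(checkingNumber) + " ")
--             else:
--                 wynikowa += count * (str(checkingNumber) + " ")
--             checkingNumber = lista[i]
--             count = 1
--         if(i == len(lista)-1):
--             if (count % 2 != 0):
--                 if (not (checkingNumber in primeEratostenes(lista[len(lista) - 1]))):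
--                     wynikowa += count * (str(checkingNumber) + " ")
--             else:
--                 wynikowa += count * (str(checkingNumber) + " ")
--
--     return wynikowa
-- ===== SOURCE B (Python) =====
-- def _isPrime(v):
--     if v < 2:
--         return False
--     d = 2
--     while d * d <= v:
--         if v % d == 0:
--             return False
--         d += 1
--     return True
--
-- def removePrimeNumber(lista):
--     lista.sort()
--     counts = {}
--     for x in lista:
--         counts[x] = counts.get(x, 0) + 1
--     parts = []
--     for v, c in counts.items():
--         if c % 2 == 0 or not _isPrime(v):
--             parts.append(c * (str(v) + " "))
--     return "".join(parts)
-- ===== Notes on version B (the rewrite author's own statement) =====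
-- stated objective: faster
-- what changed: A sieves primes by repeated list.remove/membership scans over a list of all numbers up to max(lista) and run-length-scans the sorted list by index with a duplicated last-iteration branch (recomputing the whole sieve there); B counts occurrences in one dict pass over the sorted list and decides primality of each distinct value by trial division up to its square root, joining the kept chunks.
import Mathlib
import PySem

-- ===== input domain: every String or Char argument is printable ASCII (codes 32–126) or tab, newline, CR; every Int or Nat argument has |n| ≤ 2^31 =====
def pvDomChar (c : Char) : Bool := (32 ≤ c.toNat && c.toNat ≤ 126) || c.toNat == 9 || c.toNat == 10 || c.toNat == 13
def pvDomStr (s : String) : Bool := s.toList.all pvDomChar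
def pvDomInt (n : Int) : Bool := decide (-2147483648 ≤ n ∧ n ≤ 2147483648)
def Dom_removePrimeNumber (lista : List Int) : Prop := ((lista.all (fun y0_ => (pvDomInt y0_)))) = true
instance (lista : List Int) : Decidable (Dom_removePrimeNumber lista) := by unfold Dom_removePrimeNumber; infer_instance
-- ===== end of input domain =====

-- B replaces A's removal-based sieve and index-scan over the sorted list by a counting dict plus
-- per-distinct-value trial division (objective: faster). Both A and B sort `lista` in place; the
-- equivalence proved here is about the return value.

-- ===== PORT A =====

-- inner `while True` loop of primeEratostenes; fuel only makes the recursion total (n.toNat + 1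
-- steps always suffice for the calls A makes, where numberToCheck ≥ 2)
def peInner (n c : Int) : Nat → Int → List Int → List Int
  | 0, _, primes => primes
  | fuel + 1, m, primes =>
    let m' := m + 1
    let searchNum := m' * c
    if searchNum ≤ n then
      peInner n c fuel m'
        (if primes.contains searchNum then (PySem.List.remove? primes searchNum).getD primes
         else primes)
    else primes

-- cited by peOuter's decreasing_by: the inner loop only removes elements
theorem peInner_length_le (n c : Int) : ∀ (fuel : Nat) (m : Int) (primes : List Int),
    (peInner n c fuel m primes).length ≤ primes.length := by
  intro fuel
  induction fuel with
  | zero => intro m primes; simp [peInner]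
  | succ k ih =>
    intro m primes
    simp only [peInner]
    split
    · refine le_trans (ih _ _) ?_
      split
      · next hc =>
        rw [PySem.List.remove?_eq_some_erase _ _ (by simpa using hc)]
        simpa using List.length_erase_le
      · exact le_rfl
    · exact le_rfl

-- outer `while j < len(primes)` loop
def peOuter (n : Int) (j : Nat) (primes : List Int) : List Int :=
  if h : j < primes.length then
    let numberToCheck := primes[j]
    peOuter n (j + 1) (peInner n numberToCheck (n.toNat + 1) 1 primes)
  else primes
termination_by primes.length - j
decreasing_by
  have := peInner_length_le n primes[j] (n.toNat + 1) 1 primes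
  omega

-- A returns the int -1 when n < 2; that value is only ever used in a membership test, which then
-- raises TypeError — those inputs are outside Pre_; the port returns [] there.
def primeEratostenes (n : Int) : List Int :=
  if n < 2 then []
  else
    let primes := (PySem.List.pyRange 0 n 1).map (fun i => i + 1)
    let primes := (PySem.List.remove? primes 1).getD primes
    peOuter n 0 primes

-- the chunk A appends to wynikowa for a finished group (value `checking`, multiplicity `count`)
def aEmit (primes : List Int) (checking count : Int) : List Char :=
  if PySem.Int.mod count 2 ≠ 0 then
    (if !(primes.contains checking) then
       PySem.List.pyRepeat (PySem.Int.toChars checking ++ [' ']) count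
     else [])
  else PySem.List.pyRepeat (PySem.Int.toChars checking ++ [' ']) count

-- the `for i in range(len(lista))` loop, as structural recursion over the sorted list; a singleton
-- remainder is exactly `i == len(lista)-1`, where A recomputes primeEratostenes(lista[len-1])
def aLoop (n : Int) (primes : List Int) : List Int → Int → Int → List Char → List Char
  | [], _, _, wyn => wyn
  | [x], checking, count, wyn =>
    let st : Int × Int × List Char :=
      if checking == x then (checking, count + 1, wyn)
      else (x, 1, wyn ++ aEmit primes checking count)
    st.2.2 ++ aEmit (primeEratostenes n) st.1 st.2.1
  | x :: y :: rest, checking, count, wyn =>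
    let st : Int × Int × List Char :=
      if checking == x then (checking, count + 1, wyn)
      else (x, 1, wyn ++ aEmit primes checking count)
    aLoop n primes (y :: rest) st.1 st.2.1 st.2.2

def removePrimeNumber (lista : List Int) : String :=
  let s := PySem.List.sorted lista (fun x => x) false
  match s with
  | [] => ""   -- Python raises IndexError at lista[0]; outside Pre_
  | x0 :: _ =>
    let n := (PySem.List.pyGet? s ((s.length : Int) - 1)).getD 0   -- lista[len(lista)-1], in range: s ≠ []
    String.ofList (aLoop n (primeEratostenes n) s x0 0 [])

-- ===== PORT B =====

-- trial-division `while d * d <= v`; fuel only makes the recursion total (v.toNat + 1 steps suffice)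
def bIsPrimeLoop (v : Int) : Nat → Int → Bool
  | 0, _ => true
  | fuel + 1, d =>
    if d * d ≤ v then
      (if PySem.Int.mod v d = 0 then false else bIsPrimeLoop v fuel (d + 1))
    else true

def bIsPrime (v : Int) : Bool :=
  if v < 2 then false else bIsPrimeLoop v (v.toNat + 1) 2

def removePrimeNumber_alt (lista : List Int) : String :=
  let s := PySem.List.sorted lista (fun x => x) false
  let counts := s.foldl (fun d x => d.insert x (d.getD x 0 + 1)) PySem.Dict.empty
  let parts := counts.items.foldl
    (fun acc p =>
      if PySem.Int.mod p.2 2 = 0 || !bIsPrime p.1 then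
        acc ++ [PySem.List.pyRepeat (PySem.Int.toChars p.1 ++ [' ']) p.2]
      else acc) []
  String.ofList (PySem.Chars.join [] parts)

-- ===== PRECONDITION & SPEC =====

-- Pre_ excludes exactly the inputs on which A raises: the empty list (IndexError at lista[0]) and
-- lists whose maximum is < 2 while some value occurs an odd number of times (there
-- primeEratostenes returns -1 and `checkingNumber in -1` raises TypeError).
def Pre_removePrimeNumber (lista : List Int) : Prop :=
  lista ≠ [] ∧ ((∃ x ∈ lista, 2 ≤ x) ∨ ∀ x ∈ lista, lista.count x % 2 = 0)
instance (lista : List Int) : Decidable (Pre_removePrimeNumber lista) := by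
  unfold Pre_removePrimeNumber; infer_instance

def pvWitness_removePrimeNumber : List Int := [2]

def Spec_removePrimeNumber (lista : List Int) (out : String) : Prop := out = removePrimeNumber_alt lista
instance (lista : List Int) (out : String) : Decidable (Spec_removePrimeNumber lista out) := by
  unfold Spec_removePrimeNumber; infer_instance

-- ===== CLAIM (what is proved, stated in full; the proofs are below) =====
def Claim_equal_removePrimeNumber : Prop := ∀ (lista : List Int), Dom_removePrimeNumber lista → Pre_removePrimeNumber lista → Spec_removePrimeNumber lista (removePrimeNumber lista)

-- ===== LEMMAS AND PROOFS =====

/- ## Part 1: what A's removal sieve computes -/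

-- the prime predicate both programs decide, in closed form
def IsPr (v : Int) : Prop := 2 ≤ v ∧ ∀ d, 2 ≤ d → d < v → ¬ d ∣ v

-- the survivors of one pass of the inner loop started at multiple `mlo = m+1`
def innerKeep (n c mlo v : Int) : Bool :=
  decide (¬(PySem.Int.mod v c = 0 ∧ mlo * c ≤ v ∧ v ≤ n))

theorem innerKeep_iff (n c mlo v : Int) :
    innerKeep n c mlo v = true ↔ ¬(c ∣ v ∧ mlo * c ≤ v ∧ v ≤ n) := by
  simp only [innerKeep, decide_eq_true_eq, PySem.Int.mod_eq_zero_iff_dvd]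

theorem peInner_eq_filter (n c : Int) (hc : 1 ≤ c) :
    ∀ (fuel : Nat) (m : Int), 1 ≤ m → ∀ (primes : List Int), primes.Nodup → n < m + fuel →
      peInner n c fuel m primes = primes.filter (innerKeep n c (m + 1)) := by
  intro fuel
  induction fuel with
  | zero =>
    intro m hm primes hnd hf
    simp only [peInner]
    symm
    refine List.filter_eq_self.mpr (fun v hv => ?_)
    rw [innerKeep_iff]
    rintro ⟨hdvd, hle, hvn⟩
    have h1 : m + 1 ≤ (m + 1) * c := le_mul_of_one_le_right (by omega) hc
    simp only [Nat.cast_zero] at hf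
    omega
  | succ k ih =>
    intro m hm primes hnd hf
    simp only [peInner]
    by_cases hle : (m + 1) * c ≤ n
    · rw [if_pos hle]
      have hstep :
          (if primes.contains ((m + 1) * c) then
             (PySem.List.remove? primes ((m + 1) * c)).getD primes
           else primes) = primes.filter (fun v => v != (m + 1) * c) := by
        by_cases hmem : primes.contains ((m + 1) * c)
        · rw [if_pos hmem, PySem.List.remove?_eq_some_erase _ _ (by simpa using hmem)]
          simp [hnd.erase_eq_filter]
        · rw [if_neg hmem]
          symm
          refine List.filter_eq_self.mpr (fun v hv => ?_)
          simp only [bne_iff_ne, ne_eq, decide_eq_true_eq]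
          rintro rfl
          exact hmem (by simpa using hv)
      rw [hstep, ih (m + 1) (by omega) _ (hnd.filter _) (by push_cast at hf ⊢; omega)]
      rw [List.filter_filter]
      refine List.filter_congr (fun v hv => ?_)
      rw [Bool.eq_iff_iff]
      simp only [Bool.and_eq_true, bne_iff_ne, ne_eq, innerKeep_iff]
      constructor
      · rintro ⟨hnot2, hne⟩ ⟨hdvd, hge, hvn⟩
        obtain ⟨q, hq⟩ := hdvd
        have hcq : (m + 1) * c ≤ c * q := by rw [← hq]; exact hge
        have hq1 : m + 1 ≤ q := by nlinarith
        have hq2 : q ≠ m + 1 := fun he => hne (by rw [hq, he, mul_comm])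
        apply hnot2
        refine ⟨⟨q, hq⟩, ?_, hvn⟩
        have hmono : (m + 1 + 1) * c ≤ q * c :=
          mul_le_mul_of_nonneg_right (by omega) (by omega)
        rw [hq, mul_comm c q]
        exact hmono
      · intro hnot
        constructor
        · rintro ⟨hdvd, hge, hvn⟩
          have hmono : (m + 1) * c ≤ (m + 1 + 1) * c :=
            mul_le_mul_of_nonneg_right (by omega) (by omega)
          exact hnot ⟨hdvd, by omega, hvn⟩
        · rintro rfl
          exact hnot ⟨dvd_mul_left c (m + 1), le_rfl, hle⟩
    · rw [if_neg hle]
      symm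
      refine List.filter_eq_self.mpr (fun v hv => ?_)
      rw [innerKeep_iff]
      rintro ⟨hdvd, hge, hvn⟩
      omega

-- a filter whose predicate holds on the first k elements keeps that prefix unchanged
theorem filter_take_eq {α : Type} (p : α → Bool) :
    ∀ (l : List α) (k : Nat), (∀ i (h1 : i < k) (h2 : i < l.length), p l[i] = true) →
      l.filter p = l.take k ++ (l.drop k).filter p := by
  intro l
  induction l with
  | nil => intro k h; simp
  | cons a t ih =>
    intro k h
    cases k with
    | zero => simp
    | succ k' =>
      have ha : p a = true := h 0 (by omega) (by simp)
      rw [List.filter_cons_of_pos ha, List.take_succ_cons, List.drop_succ_cons, List.cons_append]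
      rw [ih k' (fun i h1 h2 => by simpa using h (i + 1) (by omega) (by simpa using h2))]

-- every v ≥ 2 has a divisor satisfying IsPr
theorem exists_isPr_dvd : ∀ (v : Int), 2 ≤ v → ∃ p, IsPr p ∧ p ∣ v ∧ p ≤ v := by
  intro v
  induction hN : v.toNat using Nat.strong_induction_on generalizing v with
  | _ N ih =>
  intro h2
  by_cases hp : IsPr v
  · exact ⟨v, hp, dvd_rfl, le_rfl⟩
  · unfold IsPr at hp
    push_neg at hp
    obtain ⟨d, hd2, hdlt, hdd⟩ := hp h2
    obtain ⟨p, hp, hpd, hpe⟩ := ih d.toNat (by omega) d rfl hd2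
    exact ⟨p, hp, hpd.trans hdd, le_trans hpe (le_of_lt hdlt)⟩

-- after the whole list has been processed, no element properly divides another, so together with
-- "all primes are still present" every remaining element satisfies IsPr
theorem processed_isPr (n : Int) (primes : List Int)
    (hb : ∀ v ∈ primes, 2 ≤ v ∧ v ≤ n)
    (hc : ∀ p, IsPr p → p ≤ n → p ∈ primes)
    (hd : ∀ i (hil : i < primes.length), ∀ v ∈ primes, primes[i] ∣ v → v = primes[i]) :
    ∀ v ∈ primes, IsPr v := by
  intro v hv
  obtain ⟨hv2, hvn⟩ := hb v hv
  refine ⟨hv2, fun d hd2 hdlt hdd => ?_⟩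
  obtain ⟨p, hpIs, hpd, hpe⟩ := exists_isPr_dvd d hd2
  have hplt : p < v := lt_of_le_of_lt hpe hdlt
  have hpmem : p ∈ primes := hc p hpIs (by omega)
  obtain ⟨i, hil, hip⟩ := List.getElem_of_mem hpmem
  have := hd i hil v hv (by rw [hip]; exact hpd.trans hdd)
  omega

theorem peOuter_mem (n : Int) : ∀ (meas : Nat) (j : Nat) (primes : List Int),
    primes.length - j ≤ meas →
    primes.Pairwise (· < ·) →
    (∀ v ∈ primes, 2 ≤ v ∧ v ≤ n) →
    (∀ p, IsPr p → p ≤ n → p ∈ primes) →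
    (∀ i (hij : i < j) (hil : i < primes.length), ∀ v ∈ primes, primes[i] ∣ v → v = primes[i]) →
    ∀ v, (v ∈ peOuter n j primes ↔ v ∈ primes ∧ IsPr v) := by
  intro meas
  induction meas with
  | zero =>
    intro j primes hm ha hb hc hd v
    rw [peOuter, dif_neg (by omega)]
    exact ⟨fun hv => ⟨hv, processed_isPr n primes hb hc
      (fun i hil => hd i (by omega) hil) v hv⟩, fun h => h.1⟩
  | succ M ih =>
    intro j primes hm ha hb hc hd v
    rw [peOuter]
    by_cases hj : j < primes.length
    · rw [dif_pos hj]
      show v ∈ peOuter n (j + 1) (peInner n primes[j] (n.toNat + 1) 1 primes)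
        ↔ v ∈ primes ∧ IsPr v
      have hcm : primes[j] ∈ primes := List.getElem_mem hj
      obtain ⟨hc2, hcn⟩ := hb _ hcm
      have hnd : primes.Nodup := ha.imp (fun h => ne_of_lt h)
      have hfuel : n < 1 + ((n.toNat + 1 : Nat) : Int) := by
        have := Int.self_le_toNat n
        push_cast
        omega
      rw [peInner_eq_filter n primes[j] (by omega) (n.toNat + 1) 1 le_rfl primes hnd hfuel]
      set c := primes[j] with hcdef
      set p := innerKeep n c (1 + 1) with hpdef
      set primes' := primes.filter p with hprdef
      -- the first j+1 elements survive the filter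
      have hkeep : ∀ i (h1 : i < j + 1) (h2 : i < primes.length), p primes[i] = true := by
        intro i h1 h2
        have hle : primes[i] ≤ c := by
          rcases Nat.lt_or_ge i j with h | h
          · exact le_of_lt ((List.pairwise_iff_getElem.mp ha) i j h2 hj h)
          · have : i = j := by omega
            subst this
            rfl
        rw [hpdef, innerKeep_iff]
        rintro ⟨hdvd, hge, hvn⟩
        have h2i := (hb _ (List.getElem_mem h2)).1
        omega
      have hprefix : primes' = primes.take (j + 1) ++ (primes.drop (j + 1)).filter p :=
        filter_take_eq p primes (j + 1) hkeep
      have hgetpre : ∀ i (h1 : i < j + 1) (h2 : i < primes'.length), primes'[i] = primes[i] := by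
        intro i h1 h2
        have h2' : i < (List.take (j + 1) primes).length := by
          simp only [List.length_take]
          omega
        rw [List.getElem_of_eq hprefix h2, List.getElem_append_left h2']
        simp [List.getElem_take]
      have hsub : ∀ x, x ∈ primes' → x ∈ primes := fun x hx => List.mem_of_mem_filter hx
      have hkeepIsPr : ∀ q, IsPr q → q ∈ primes → q ∈ primes' := by
        intro q hq hqm
        rw [hprdef, List.mem_filter]
        refine ⟨hqm, ?_⟩
        rw [hpdef, innerKeep_iff]
        rintro ⟨hdvd, hge, hvn⟩
        have hclt : c < q := by omega
        exact hq.2 c hc2 hclt hdvd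
      have ihres := ih (j + 1) primes'
        (by have : primes'.length ≤ primes.length := List.length_filter_le _ _; omega)
        (ha.filter p)
        (fun x hx => hb x (hsub x hx))
        (fun q hq hqn => hkeepIsPr q hq (hc q hq hqn))
        (by
          intro i hij hil x hx hdvd
          rcases Nat.lt_or_ge i j with h | h
          · rw [hgetpre i (by omega) hil] at hdvd ⊢
            exact hd i h (by omega) x (hsub x hx) hdvd
          · have : i = j := by omega
            subst this
            have hgc : primes'[i] = c := by rw [hgetpre i (by omega) hil]
            rw [hgc] at hdvd ⊢
            have hxk : p x = true := (List.mem_filter.mp hx).2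
            rw [hpdef, innerKeep_iff] at hxk
            obtain ⟨hx2, hxn⟩ := hb x (hsub x hx)
            have hxlt : x < (1 + 1) * c := by
              by_contra hcon
              push_neg at hcon
              exact hxk ⟨hdvd, hcon, hxn⟩
            obtain ⟨q, hq⟩ := hdvd
            have hq1 : 1 ≤ q := by nlinarith
            have hq2 : q < 2 := by nlinarith
            have hqe : q = 1 := by omega
            rw [hq, hqe, mul_one])
        v
      rw [ihres]
      constructor
      · rintro ⟨hv', hvp⟩
        exact ⟨hsub v hv', hvp⟩
      · rintro ⟨hv, hvp⟩
        exact ⟨hkeepIsPr v hvp hv, hvp⟩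
    · rw [dif_neg hj]
      exact ⟨fun hv => ⟨hv, processed_isPr n primes hb hc
        (fun i hil => hd i (by omega) hil) v hv⟩, fun h => h.1⟩

theorem sieve_mem (n : Int) (hn : 2 ≤ n) (v : Int) :
    v ∈ primeEratostenes n ↔ 2 ≤ v ∧ v ≤ n ∧ IsPr v := by
  unfold primeEratostenes
  rw [if_neg (by omega)]
  show v ∈ peOuter n 0 ((PySem.List.remove? ((PySem.List.pyRange 0 n 1).map (fun i => i + 1)) 1).getD
      ((PySem.List.pyRange 0 n 1).map (fun i => i + 1))) ↔ _
  have hcons : PySem.List.pyRange 0 n 1 = 0 :: PySem.List.pyRange (0 + 1) n 1 :=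
    PySem.List.pyRange_one_cons (by omega)
  rw [hcons]
  simp only [List.map_cons, zero_add]
  rw [PySem.List.remove?_cons_self]
  simp only [Option.getD_some]
  set l1 := (PySem.List.pyRange 1 n 1).map (fun i => i + 1) with hl1
  have hmem : ∀ x, x ∈ l1 ↔ 2 ≤ x ∧ x ≤ n := by
    intro x
    rw [hl1]
    simp only [List.mem_map, PySem.List.mem_pyRange_one]
    constructor
    · rintro ⟨u, ⟨h1, h2⟩, rfl⟩; omega
    · intro ⟨h1, h2⟩; exact ⟨x - 1, ⟨by omega, by omega⟩, by omega⟩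
  have hpair : l1.Pairwise (· < ·) := by
    rw [hl1, PySem.List.pyRange_of_pos 1 n (by omega), List.map_map]
    exact (List.pairwise_lt_range).map _ (fun a b h => by simp only [Function.comp]; push_cast; omega)
  have hchar := peOuter_mem n l1.length 0 l1 (by omega) hpair
    (fun x hx => (hmem x).mp hx)
    (fun q hq hqn => (hmem q).mpr ⟨hq.1, hqn⟩)
    (fun i hij => by omega)
    v
  rw [hchar]
  constructor
  · rintro ⟨hv, hp⟩
    obtain ⟨h1, h2⟩ := (hmem v).mp hv
    exact ⟨h1, h2, hp⟩
  · rintro ⟨h1, h2, hp⟩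
    exact ⟨(hmem v).mpr ⟨h1, h2⟩, hp⟩

/- ## Part 2: what B's trial division computes -/

theorem sqrt_bridge (v : Int) (h2 : 2 ≤ v) :
    (∀ e, 2 ≤ e → e * e ≤ v → ¬ e ∣ v) ↔ (∀ d, 2 ≤ d → d < v → ¬ d ∣ v) := by
  constructor
  · intro h d hd2 hdlt hdd
    obtain ⟨q, hq⟩ := hdd
    have hq1 : 1 ≤ q := by nlinarith
    have hqne : q ≠ 1 := by rintro rfl; omega
    have hq2 : 2 ≤ q := by omega
    by_cases hsq : d * d ≤ v
    · exact h d hd2 hsq ⟨q, hq⟩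
    · push_neg at hsq
      have hqd : q < d := by nlinarith
      have hqq : q * q ≤ v := by nlinarith
      exact h q hq2 hqq ⟨d, by rw [hq, mul_comm]⟩
  · intro h e he2 hee hev
    have helt : e < v := by nlinarith
    exact h e he2 helt hev

theorem bIsPrimeLoop_iff (v : Int) : ∀ (fuel : Nat) (d : Int), 2 ≤ d → v < d + fuel →
    (bIsPrimeLoop v fuel d = true ↔ ∀ e, d ≤ e → e * e ≤ v → ¬ e ∣ v) := by
  intro fuel
  induction fuel with
  | zero =>
    intro d hd hf
    simp only [bIsPrimeLoop, true_iff]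
    intro e hde hee hev
    have h1 : e ≤ e * e := le_mul_of_one_le_left (by omega) (by omega)
    simp only [Nat.cast_zero] at hf
    omega
  | succ k ih =>
    intro d hd hf
    simp only [bIsPrimeLoop]
    by_cases hdd : d * d ≤ v
    · rw [if_pos hdd]
      by_cases hmod : PySem.Int.mod v d = 0
      · rw [if_pos hmod]
        constructor
        · intro hcon
          exact absurd hcon (by simp)
        · intro h
          exact absurd ((PySem.Int.mod_eq_zero_iff_dvd v d).mp hmod) (h d le_rfl hdd)
      · rw [if_neg hmod]
        rw [ih (d + 1) (by omega) (by push_cast at hf ⊢; omega)]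
        constructor
        · intro h e hde hee hev
          rcases eq_or_lt_of_le hde with rfl | hlt
          · exact hmod ((PySem.Int.mod_eq_zero_iff_dvd v d).mpr hev)
          · exact h e (by omega) hee hev
        · intro h e hde hee hev
          exact h e (by omega) hee hev
    · rw [if_neg hdd]
      push_neg at hdd
      simp only [true_iff]
      intro e hde hee hev
      have hsq : d * d ≤ e * e := mul_le_mul hde hde (by omega) (by omega)
      omega

theorem bIsPrime_iff (v : Int) : bIsPrime v = true ↔ IsPr v := by
  unfold bIsPrime
  by_cases hv : v < 2
  · rw [if_pos hv]
    constructor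
    · intro hcon
      exact absurd hcon (by simp)
    · rintro ⟨h2, _⟩
      omega
  · rw [if_neg hv]
    push_neg at hv
    have hfuel : v < 2 + ((v.toNat + 1 : Nat) : Int) := by
      have := Int.self_le_toNat v
      push_cast
      omega
    rw [bIsPrimeLoop_iff v (v.toNat + 1) 2 le_rfl hfuel, sqrt_bridge v hv]
    exact ⟨fun h => ⟨hv, h⟩, fun h => h.2⟩

/- ## Part 3: run-length structure of the sorted list -/

theorem run_decomp : ∀ (t : List Int) (v : Int), (v :: t).Pairwise (· ≤ ·) →
    ∃ (k : Nat) (rest : List Int), v :: t = List.replicate (k + 1) v ++ rest ∧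
      (v :: t).count v = k + 1 ∧ (∀ y ∈ rest, v < y) ∧ rest.Pairwise (· ≤ ·) := by
  intro t
  induction t with
  | nil =>
    intro v h
    exact ⟨0, [], by simp, by simp, by simp, by simp⟩
  | cons u t' ih =>
    intro v h
    have hhead : ∀ y ∈ u :: t', v ≤ y := (List.pairwise_cons.mp h).1
    have ht : (u :: t').Pairwise (· ≤ ·) := (List.pairwise_cons.mp h).2
    by_cases huv : u = v
    · subst huv
      obtain ⟨k, rest, he, hc, hr, hp⟩ := ih u ht
      refine ⟨k + 1, rest, ?_, ?_, hr, hp⟩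
      · rw [List.replicate_succ, List.cons_append, ← he]
      · rw [List.count_cons_self, hc]
    · have hvu : v < u := lt_of_le_of_ne (hhead u (by simp)) (fun he => huv he.symm)
      have hall : ∀ y ∈ u :: t', v < y := by
        intro y hy
        rcases List.mem_cons.mp hy with rfl | hy'
        · exact hvu
        · exact lt_of_lt_of_le hvu ((List.pairwise_cons.mp ht).1 y hy')
      refine ⟨0, u :: t', by simp, ?_, hall, ht⟩
      rw [List.count_cons_self]
      rw [List.count_eq_zero.mpr (fun hmem => absurd (hall v hmem) (lt_irrefl v))]

-- PySem.Set.add on a set already containing v is the identity (used for dedup of a run)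
theorem foldl_add_mem {s : PySem.Set Int} (v : Int) (hv : v ∈ s) :
    ∀ (j : Nat), List.foldl PySem.Set.add s (List.replicate j v) = s := by
  intro j
  induction j with
  | zero => simp
  | succ k ih => simp [List.replicate_succ, PySem.Set.add, hv, ih]

theorem dedup_run (k : Nat) (v : Int) (rest : List Int) (hv : v ∉ rest) :
    PySem.List.dedup (List.replicate (k + 1) v ++ rest) = v :: PySem.List.dedup rest := by
  rw [PySem.List.dedup_eq_ofList, PySem.List.dedup_eq_ofList]
  have h1 : PySem.Set.ofList (List.replicate (k + 1) v ++ rest)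
      = PySem.Set.update (PySem.Set.ofList (List.replicate (k + 1) v)) rest := by
    rw [PySem.Set.ofList_eq_foldl, PySem.Set.ofList_eq_foldl, List.foldl_append]
    rfl
  have h2 : PySem.Set.ofList (List.replicate (k + 1) v) = [v] := by
    rw [PySem.Set.ofList_eq_foldl, List.replicate_succ, List.foldl_cons]
    have hadd : PySem.Set.add ([] : PySem.Set Int) v = [v] := by
      simp [PySem.Set.add]
    rw [hadd]
    exact foldl_add_mem v (by simp) k
  rw [h1, h2, PySem.Set.update_eq_append_filter]
  have h3 : List.filter (fun y => !PySem.Set.contains [v] y) (PySem.Set.ofList rest)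
      = PySem.Set.ofList rest := by
    refine List.filter_eq_self.mpr (fun y hy => ?_)
    have hyr : y ∈ rest := (PySem.Set.mem_ofList rest y).mp hy
    have hne : y ≠ v := fun he => hv (he ▸ hyr)
    simp [PySem.Set.contains, hne]
  rw [h3]
  rfl

/- ## Part 4: what A's scanning loop produces -/

-- a run of the current value only bumps the counter; the final singleton emits with the
-- recomputed primeEratostenes n
theorem aLoop_replicate (n : Int) (P : List Int) : ∀ (k : Nat) (x c : Int) (w : List Char),
    aLoop n P (List.replicate (k + 1) x) x c w
      = w ++ aEmit (primeEratostenes n) x (c + ((k : Int) + 1)) := by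
  intro k
  induction k with
  | zero =>
    intro x c w
    simp [aLoop]
  | succ k' ih =>
    intro x c w
    rw [List.replicate_succ, List.replicate_succ]
    simp only [aLoop, beq_self_eq_true, if_true]
    rw [← List.replicate_succ, ih]
    have harg : c + 1 + ((k' : Int) + 1) = c + (((k' + 1 : Nat) : Int) + 1) := by
      push_cast; ring
    rw [harg]

theorem aLoop_skip (n : Int) (P : List Int) : ∀ (k : Nat) (x c : Int) (w : List Char)
    (y : Int) (rest : List Int), x ≠ y →
    aLoop n P (List.replicate k x ++ y :: rest) x c w
      = aLoop n P (y :: rest) x (c + (k : Int)) w := by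
  intro k
  induction k with
  | zero => intro x c w y rest hxy; simp
  | succ k' ih =>
    intro x c w y rest hxy
    rw [List.replicate_succ, List.cons_append]
    have hne : List.replicate k' x ++ y :: rest ≠ [] := by simp
    obtain ⟨z, l, hzl⟩ := List.exists_cons_of_ne_nil hne
    rw [hzl]
    simp only [aLoop, beq_self_eq_true, if_true]
    rw [← hzl, ih x (c + 1) w y rest hxy]
    have harg : c + 1 + (k' : Int) = c + (((k' + 1 : Nat) : Int)) := by push_cast; ring
    rw [harg]

-- rewriting one group off the front of the dedup/count view
theorem map_dedup_run (g : Int → Int → List Char) (k : Nat) (v : Int) (rest : List Int)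
    (hrest : ∀ y ∈ rest, v < y) :
    ((PySem.List.dedup (List.replicate (k + 1) v ++ rest)).map
        (fun u => g u (((List.replicate (k + 1) v ++ rest).count u : Nat) : Int))).flatten
      = g v (((k + 1 : Nat) : Int))
        ++ ((PySem.List.dedup rest).map (fun u => g u ((rest.count u : Nat) : Int))).flatten := by
  have hv : v ∉ rest := fun hm => absurd (hrest v hm) (lt_irrefl v)
  rw [dedup_run k v rest hv, List.map_cons, List.flatten_cons]
  congr 1
  · congr 1
    rw [List.count_append, List.count_replicate_self, List.count_eq_zero.mpr hv]
  · refine congrArg _ (List.map_congr_left (fun u hu => ?_))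
    have hur : u ∈ rest := (PySem.List.mem_dedup rest u).mp hu
    have hne : v ≠ u := ne_of_lt (hrest u hur)
    congr 1
    have hnr : u ∉ List.replicate (k + 1) v := by
      rw [List.mem_replicate]
      rintro ⟨-, rfl⟩
      exact hne rfl
    rw [List.count_append, List.count_eq_zero.mpr hnr, Nat.zero_add]

-- A's loop over a sorted remainder, with pending group (x, c)
theorem aLoop_groups (n : Int) : ∀ (L : Nat) (s : List Int), s.length ≤ L → s ≠ [] →
    s.Pairwise (· ≤ ·) → ∀ (x c : Int) (w : List Char), (∀ y ∈ s, x < y) →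
    aLoop n (primeEratostenes n) s x c w
      = w ++ aEmit (primeEratostenes n) x c
        ++ ((PySem.List.dedup s).map
            (fun v => aEmit (primeEratostenes n) v ((s.count v : Nat) : Int))).flatten := by
  intro L
  induction L with
  | zero =>
    intro s hL hne
    cases s with
    | nil => exact absurd rfl hne
    | cons a t => simp at hL
  | succ M ih =>
    intro s hL hne hsort x c w hx
    obtain ⟨v, t, rfl⟩ := List.exists_cons_of_ne_nil hne
    obtain ⟨k, rest, heq, hcount, hrest, hrestsort⟩ := run_decomp t v hsort
    have hvx : x ≠ v := ne_of_lt (hx v (by simp))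
    rw [heq] at hL ⊢
    rw [map_dedup_run _ k v rest hrest]
    cases rest with
    | nil =>
      rw [List.append_nil]
      cases k with
      | zero =>
        simp only [List.replicate_succ, List.replicate_zero]
        simp only [aLoop, beq_iff_eq, if_neg hvx]
        show (w ++ aEmit (primeEratostenes n) x c) ++ aEmit (primeEratostenes n) v 1 = _
        simp [List.append_assoc]
      | succ k' =>
        rw [List.replicate_succ]
        have hne2 : List.replicate (k' + 1) v ≠ [] := by simp
        obtain ⟨z, l, hzl⟩ := List.exists_cons_of_ne_nil hne2
        rw [hzl]
        simp only [aLoop, beq_iff_eq, if_neg hvx]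
        rw [← hzl, aLoop_replicate]
        have harg : (1 : Int) + ((k' : Int) + 1) = (((k' + 1 + 1 : Nat) : Int)) := by
          push_cast; ring
        rw [harg]
        simp [List.append_assoc]
    | cons y rest' =>
      rw [List.replicate_succ, List.cons_append]
      have hne2 : List.replicate k v ++ y :: rest' ≠ [] := by simp
      obtain ⟨z, l, hzl⟩ := List.exists_cons_of_ne_nil hne2
      rw [hzl]
      simp only [aLoop, beq_iff_eq, if_neg hvx]
      rw [← hzl, aLoop_skip n _ k v 1 _ y rest' (ne_of_lt (hrest y (by simp)))]
      have hlen : (y :: rest').length ≤ M := by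
        simp only [List.length_append, List.length_replicate, List.length_cons] at hL ⊢
        omega
      rw [ih (y :: rest') hlen (by simp) hrestsort v (1 + (k : Int))
        (w ++ aEmit (primeEratostenes n) x c) hrest]
      have harg : (1 : Int) + (k : Int) = (((k + 1 : Nat) : Int)) := by push_cast; ring
      rw [harg]
      simp [List.append_assoc]

/- ## Part 5: A's top level -/

theorem A_eq (lista : List Int) (x0 : Int) (t : List Int)
    (hs : PySem.List.sorted lista (fun x => x) false = x0 :: t) :
    removePrimeNumber lista = String.ofList
      (((PySem.List.dedup (x0 :: t)).map
        (fun v => aEmit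
          (primeEratostenes ((PySem.List.pyGet? (x0 :: t) (((x0 :: t).length : Int) - 1)).getD 0))
          v (((x0 :: t).count v : Nat) : Int))).flatten) := by
  unfold removePrimeNumber
  rw [hs]
  show String.ofList
      (aLoop ((PySem.List.pyGet? (x0 :: t) (((x0 :: t).length : Int) - 1)).getD 0)
        (primeEratostenes ((PySem.List.pyGet? (x0 :: t) (((x0 :: t).length : Int) - 1)).getD 0))
        (x0 :: t) x0 0 []) = _
  set nv := (PySem.List.pyGet? (x0 :: t) (((x0 :: t).length : Int) - 1)).getD 0 with hnv
  have hsort : (x0 :: t).Pairwise (· ≤ ·) := by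
    have hp := PySem.List.sorted_pairwise lista (fun x => x)
    rw [hs] at hp
    exact hp
  obtain ⟨k, rest, heq, hcount, hrest, hrestsort⟩ := run_decomp t x0 hsort
  rw [heq, map_dedup_run _ k x0 rest hrest]
  cases rest with
  | nil =>
    rw [List.append_nil, aLoop_replicate]
    have harg : (0 : Int) + ((k : Int) + 1) = (((k + 1 : Nat) : Int)) := by push_cast; ring
    rw [harg]
    simp
  | cons y rest' =>
    rw [aLoop_skip nv (primeEratostenes nv) (k + 1) x0 0 [] y rest'
      (ne_of_lt (hrest y (by simp)))]
    rw [aLoop_groups nv (y :: rest').length (y :: rest') le_rfl (by simp) hrestsort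
      x0 (0 + ((k + 1 : Nat) : Int)) [] hrest]
    have harg : (0 : Int) + (((k + 1 : Nat) : Int)) = (((k + 1 : Nat) : Int)) := by ring
    rw [harg]
    simp [List.append_assoc]

/- ## Part 6: B's top level -/

def bPart (v c : Int) : List Char :=
  if PySem.Int.mod c 2 = 0 || !bIsPrime v then
    PySem.List.pyRepeat (PySem.Int.toChars v ++ [' ']) c
  else []

theorem join_nil_flatten : ∀ (L : List (List Char)), PySem.Chars.join [] L = L.flatten := by
  intro L
  show List.intercalate [] L = L.flatten
  unfold List.intercalate
  induction L with
  | nil => rfl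
  | cons a T ih =>
    cases T with
    | nil => simp
    | cons b T' =>
      show (a :: [] :: List.intersperse [] (b :: T')).flatten = _
      rw [List.flatten_cons, List.flatten_cons, ih]
      simp

theorem flatten_filter_ite {α : Type} (p : α → Bool) (f : α → List Char) :
    ∀ (l : List α),
      ((l.filter p).map f).flatten = (l.map (fun x => if p x then f x else [])).flatten := by
  intro l
  induction l with
  | nil => simp
  | cons a t ih =>
    by_cases h : p a
    · rw [List.filter_cons_of_pos h]
      simp [h, ih]
    · rw [List.filter_cons_of_neg (by simpa using h)]
      simp [h, ih]

theorem B_eq (lista : List Int) :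
    removePrimeNumber_alt lista = String.ofList
      (((PySem.List.dedup (PySem.List.sorted lista (fun x => x) false)).map
        (fun v => bPart v
          (((PySem.List.sorted lista (fun x => x) false).count v : Nat) : Int))).flatten) := by
  unfold removePrimeNumber_alt
  show String.ofList (PySem.Chars.join []
    (List.foldl
      (fun acc q =>
        if PySem.Int.mod q.2 2 = 0 || !bIsPrime q.1 then
          acc ++ [PySem.List.pyRepeat (PySem.Int.toChars q.1 ++ [' ']) q.2]
        else acc) []
      (List.foldl (fun d x => d.insert x (d.getD x 0 + 1)) PySem.Dict.empty
        (PySem.List.sorted lista (fun x => x) false)).items)) = _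
  rw [PySem.Dict.foldl_insert_getD_add_one_eq_counter, PySem.Dict.items_counter]
  rw [PySem.List.foldl_append_if
    (fun q : Int × Int => (decide (PySem.Int.mod q.2 2 = 0) || !bIsPrime q.1))
    (fun q : Int × Int => PySem.List.pyRepeat (PySem.Int.toChars q.1 ++ [' ']) q.2)]
  rw [List.nil_append, join_nil_flatten, flatten_filter_ite]
  rw [List.map_map, ← PySem.List.dedup_eq_ofList]
  rfl

/- ## Part 7: the last element of the sorted list bounds every element -/

theorem sorted_le_last (s : List Int) (hp : s.Pairwise (· ≤ ·)) (hne : s ≠ []) :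
    ∀ v ∈ s, v ≤ (PySem.List.pyGet? s ((s.length : Int) - 1)).getD 0 := by
  have hlen : 1 ≤ s.length := List.length_pos_iff.mpr hne
  have hcast : ((s.length : Int) - 1) = ((s.length - 1 : Nat) : Int) := by push_cast; omega
  rw [hcast, PySem.List.pyGet?_natCast]
  have hlt : s.length - 1 < s.length := by omega
  rw [List.getElem?_eq_getElem hlt]
  simp only [Option.getD_some]
  intro v hv
  obtain ⟨i, hi, hieq⟩ := List.getElem_of_mem hv
  rw [← hieq]
  rcases Nat.lt_or_ge i (s.length - 1) with h | h
  · exact (List.pairwise_iff_getElem.mp hp) i (s.length - 1) hi hlt h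
  · have : i = s.length - 1 := by omega
    subst this
    exact le_rfl

/- ## Part 8: each group contributes the same chunk in A and in B -/

theorem emit_eq (n v c : Int) (hside : PySem.Int.mod c 2 = 0 ∨ (2 ≤ n ∧ v ≤ n)) :
    aEmit (primeEratostenes n) v c = bPart v c := by
  unfold aEmit bPart
  by_cases hm : PySem.Int.mod c 2 = 0
  · rw [if_neg (fun hcon => hcon hm)]
    have hcond : (decide (PySem.Int.mod c 2 = 0) || !bIsPrime v) = true := by
      rw [decide_eq_true hm, Bool.true_or]
    rw [if_pos hcond]
  · rw [if_pos hm]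
    obtain ⟨hn, hvn⟩ := hside.resolve_left hm
    have hmemiff : (primeEratostenes n).contains v = bIsPrime v := by
      rw [Bool.eq_iff_iff]
      rw [List.contains_iff_mem, sieve_mem n hn v, bIsPrime_iff]
      exact ⟨fun h => h.2.2, fun h => ⟨h.1, hvn, h⟩⟩
    have hcond : (decide (PySem.Int.mod c 2 = 0) || !bIsPrime v) = !bIsPrime v := by
      rw [decide_eq_false hm, Bool.false_or]
    rw [hmemiff, hcond]

/- ## Part 9: assembly -/

-- ===== VERDICT (the statements are the Claim_ definitions above) =====
theorem removePrimeNumber_spec : Claim_equal_removePrimeNumber := by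
  unfold Claim_equal_removePrimeNumber
  intro lista hdom hpre
  unfold Spec_removePrimeNumber
  obtain ⟨hne, hcond⟩ := hpre
  have hsne : PySem.List.sorted lista (fun x => x) false ≠ [] := by
    intro h
    exact hne ((PySem.List.sorted_eq_nil_iff lista (fun x => x) false).mp h)
  obtain ⟨x0, t, hs⟩ := List.exists_cons_of_ne_nil hsne
  have hsort : (x0 :: t).Pairwise (· ≤ ·) := by
    have hp := PySem.List.sorted_pairwise lista (fun x => x)
    rw [hs] at hp
    exact hp
  have hperm : (x0 :: t).Perm lista := by
    have hp := PySem.List.sorted_perm lista (fun x => x) false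
    rw [hs] at hp
    exact hp
  rw [A_eq lista x0 t hs, B_eq lista, hs]
  congr 1
  refine congrArg _ (List.map_congr_left (fun v hv => ?_))
  have hvs : v ∈ x0 :: t := (PySem.List.mem_dedup (x0 :: t) v).mp hv
  apply emit_eq
  by_cases hmod : PySem.Int.mod ((((x0 :: t).count v : Nat)) : Int) 2 = 0
  · exact Or.inl hmod
  · right
    have hle := sorted_le_last (x0 :: t) hsort (by simp)
    refine ⟨?_, hle v hvs⟩
    rcases hcond with ⟨x, hx, hx2⟩ | hall
    · have hxs : x ∈ x0 :: t := hperm.mem_iff.mpr hx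
      have := hle x hxs
      omega
    · exfalso
      apply hmod
      have hcnt : (x0 :: t).count v = lista.count v := hperm.count_eq v
      have heven := hall v (hperm.subset hvs)
      rw [PySem.Int.mod_eq_emod_of_pos (by norm_num), hcnt]
      omega
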